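-- pv_equiv track=rewrite | github.com/jjudes/chef | chef/utils.py | biluo_tag
-- ===== SOURCE A (Python) =====
-- def biluo_tag(y):
--     """
--     Append BILUO tags to the beginning of each label
--
--     Arguments:
--         y: List of labels
--
--     BILUO is specified as follows:
--         BEGIN - The first token of a multi-token entity.
--         IN ---- An inner token of a multi-token entity.
--         LAST -- The final token of a multi-token entity.
--         UNIT -- A single-token entity.
--         OUT --- A non-entity token.
--     """
--
--     n = len(y)
--
--     # Trivial cases of empty or unit sequence
--     if n == 0:
--         return []
--     if n == 1:
--         if not y[0]:
--             return ["O"]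
--         else:
--             return ["U-" + y[0]]
--
--     tagged = []
--
--     # First label can only be B, U, or O
--     if not y[0]:
--         tagged.append("O")
--     elif y[0] == y[1]:
--         tagged.append("B-" + y[0])
--     else:
--         tagged.append("U-" + y[0])
--
--     # Intermediary labels
--     for i in range(1, n - 1):
--
--         prv = y[i] == y[i - 1]
--         nxt = y[i] == y[i + 1]
--
--         if not y[i]:
--             tagged.append("O")
--         elif not prv and nxt:
--             tagged.append("B-" + y[i])
--         elif prv and nxt:
--             tagged.append("I-" + y[i])
--         elif prv and not nxt:
--             tagged.append("L-" + y[i])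
--         else:
--             tagged.append("U-" + y[i])
--
--     # Last label can only be L, U, or O
--     if not y[n - 1]:
--         tagged.append("O")
--     elif y[n - 1] == y[n - 2]:
--         tagged.append("L-" + y[n - 1])
--     else:
--         tagged.append("U-" + y[n - 1])
--
--     return tagged
-- ===== SOURCE B (Python) =====
-- def biluo_tag(y):
--     """Run-based BILUO tagging: walk maximal runs of equal labels instead of
--     checking each position's neighbors."""
--     tagged = []
--     i, n = 0, len(y)
--     while i < n:
--         key = y[i]
--         j = i
--         while j < n and y[j] == key:
--             j += 1
--         L = j - i
--         if not key:
--             tagged += ["O"] * L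
--         elif L == 1:
--             tagged.append("U-" + key)
--         else:
--             tagged += ["B-" + key] + ["I-" + key] * (L - 2) + ["L-" + key]
--         i = j
--     return tagged
-- ===== Notes on version B (the rewrite author's own statement) =====
-- stated objective: alternative
-- what changed: B walks maximal runs of equal labels and emits each run's whole tag block (O*, U, or B I* L) at once, instead of A's per-position comparison with both neighbours.
import Mathlib
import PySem

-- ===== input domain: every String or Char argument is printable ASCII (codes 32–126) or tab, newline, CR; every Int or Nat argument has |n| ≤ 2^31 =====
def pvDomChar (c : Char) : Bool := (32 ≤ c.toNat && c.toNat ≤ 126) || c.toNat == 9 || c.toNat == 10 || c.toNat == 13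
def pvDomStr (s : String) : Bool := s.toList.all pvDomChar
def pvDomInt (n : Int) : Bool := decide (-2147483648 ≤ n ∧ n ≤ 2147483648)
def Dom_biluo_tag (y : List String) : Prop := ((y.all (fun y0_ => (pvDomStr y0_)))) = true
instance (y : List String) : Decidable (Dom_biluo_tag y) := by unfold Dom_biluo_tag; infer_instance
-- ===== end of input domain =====

-- B walks maximal runs of equal labels and emits each run's tags at once, instead of
-- A's per-position comparison with both neighbours (alternative decomposition, same cost).

-- ===== PORT A =====
def biluo_tag (y : List String) : List String :=
  let n : Int := y.length
  if n = 0 then []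
  else if n = 1 then
    (if PySem.List.pyGetD y 0 "" = "" then ["O"]
     else ["U-" ++ PySem.List.pyGetD y 0 ""])
  else
    let tagged : List String := []
    let tagged :=
      if PySem.List.pyGetD y 0 "" = "" then tagged ++ ["O"]
      else if PySem.List.pyGetD y 0 "" = PySem.List.pyGetD y 1 "" then
        tagged ++ ["B-" ++ PySem.List.pyGetD y 0 ""]
      else tagged ++ ["U-" ++ PySem.List.pyGetD y 0 ""]
    let tagged := (PySem.List.pyRange 1 (n - 1) 1).foldl (fun tagged i =>
      let prv := PySem.List.pyGetD y i "" == PySem.List.pyGetD y (i - 1) ""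
      let nxt := PySem.List.pyGetD y i "" == PySem.List.pyGetD y (i + 1) ""
      if PySem.List.pyGetD y i "" = "" then tagged ++ ["O"]
      else if !prv && nxt then tagged ++ ["B-" ++ PySem.List.pyGetD y i ""]
      else if prv && nxt then tagged ++ ["I-" ++ PySem.List.pyGetD y i ""]
      else if prv && !nxt then tagged ++ ["L-" ++ PySem.List.pyGetD y i ""]
      else tagged ++ ["U-" ++ PySem.List.pyGetD y i ""]) tagged
    let tagged :=
      if PySem.List.pyGetD y (n - 1) "" = "" then tagged ++ ["O"]
      else if PySem.List.pyGetD y (n - 1) "" = PySem.List.pyGetD y (n - 2) "" then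
        tagged ++ ["L-" ++ PySem.List.pyGetD y (n - 1) ""]
      else tagged ++ ["U-" ++ PySem.List.pyGetD y (n - 1) ""]
    tagged

-- ===== PORT B =====
-- Source B scans the maximal run of labels equal to the first one, tags the run, and
-- continues after it; the index-based while loops become run-splitting recursion.
def biluo_tag_alt : List String → List String
  | [] => []
  | key :: rest =>
    let t := rest.takeWhile (fun s => s == key)
    let L := t.length + 1
    (if key = "" then List.replicate L "O"
     else if L = 1 then ["U-" ++ key]
     else ["B-" ++ key] ++ List.replicate (L - 2) ("I-" ++ key) ++ ["L-" ++ key])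
    ++ biluo_tag_alt (rest.dropWhile (fun s => s == key))
  termination_by l => l.length
  decreasing_by
    exact Nat.lt_succ_of_le (List.length_dropWhile_le _ _)

-- ===== PRECONDITION & SPEC =====
def Spec_biluo_tag (y : List String) (out : List String) : Prop := out = biluo_tag_alt y
instance (y : List String) (out : List String) : Decidable (Spec_biluo_tag y out) := by unfold Spec_biluo_tag; infer_instance

-- ===== CLAIM (what is proved, stated in full; the proofs are below) =====
def Claim_equal_biluo_tag : Prop := ∀ (y : List String), Dom_biluo_tag y → Spec_biluo_tag y (biluo_tag y)

-- ===== LEMMAS AND PROOFS =====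

-- The tag of one position, given whether it equals its left / right neighbour.
def midTagS (prv nxt : Bool) (a : String) : String :=
  if a = "" then "O"
  else if !prv && nxt then "B-" ++ a
  else if prv && nxt then "I-" ++ a
  else if prv && !nxt then "L-" ++ a
  else "U-" ++ a

def endTagS (prv : Bool) (a : String) : String :=
  if a = "" then "O" else if prv then "L-" ++ a else "U-" ++ a

-- Common reference form: tag the list left to right, carrying "equal to previous?".
def walk (prv : Bool) : List String → List String
  | [] => []
  | [a] => [endTagS prv a]
  | a :: b :: l => midTagS prv (a == b) a :: walk (a == b) (b :: l)

-- ---- B = walk false ----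

lemma walk_single (prv : Bool) (a : String) : walk prv [a] = [endTagS prv a] := rfl

lemma walk_cons_cons (prv : Bool) (a b : String) (l : List String) :
    walk prv (a :: b :: l) = midTagS prv (a == b) a :: walk (a == b) (b :: l) := rfl

lemma walk_inner (k : String) : ∀ (m : Nat) (r : List String),
    (∀ b ∈ r.head?, ¬ b = k) →
    walk true (List.replicate (m + 1) k ++ r)
      = List.replicate m (if k = "" then "O" else "I-" ++ k)
        ++ [if k = "" then "O" else "L-" ++ k] ++ walk false r := by
  intro m
  induction m with
  | zero =>
    intro r h
    cases r with
    | nil =>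
      have e : List.replicate (0 + 1) k ++ ([] : List String) = [k] := by simp
      rw [e, walk_single]
      by_cases hk : k = "" <;> simp [walk, endTagS, hk]
    | cons b r' =>
      have hne : (k == b) = false := by
        simp only [List.head?_cons, Option.mem_some_iff] at h
        exact beq_eq_false_iff_ne.mpr (fun he => h b rfl he.symm)
      have e : List.replicate (0 + 1) k ++ (b :: r') = k :: b :: r' := by simp
      rw [e, walk_cons_cons, hne]
      by_cases hk : k = "" <;> simp [midTagS, hk]
  | succ m ih =>
    intro r h
    have hcons2 : List.replicate (m + 1) k ++ r = k :: (List.replicate m k ++ r) := by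
      simp [List.replicate_succ]
    have hcons : List.replicate (m + 1 + 1) k ++ r = k :: (List.replicate (m + 1) k ++ r) := by
      simp [List.replicate_succ]
    rw [hcons, hcons2, walk_cons_cons, ← hcons2, beq_self_eq_true, ih r h]
    by_cases hk : k = "" <;> simp [midTagS, hk, List.replicate_succ]

lemma walk_run (k : String) (m : Nat) (r : List String)
    (h : ∀ b ∈ r.head?, ¬ b = k) :
    walk false (List.replicate (m + 1) k ++ r)
      = (if k = "" then List.replicate (m + 1) "O"
         else if m = 0 then ["U-" ++ k]
         else ["B-" ++ k] ++ List.replicate (m - 1) ("I-" ++ k) ++ ["L-" ++ k])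
        ++ walk false r := by
  cases m with
  | zero =>
    cases r with
    | nil =>
      have e : List.replicate (0 + 1) k ++ ([] : List String) = [k] := by simp
      rw [e, walk_single]
      by_cases hk : k = "" <;> simp [walk, endTagS, hk]
    | cons b r' =>
      have hne : (k == b) = false := by
        simp only [List.head?_cons, Option.mem_some_iff] at h
        exact beq_eq_false_iff_ne.mpr (fun he => h b rfl he.symm)
      have e : List.replicate (0 + 1) k ++ (b :: r') = k :: b :: r' := by simp
      rw [e, walk_cons_cons, hne]
      by_cases hk : k = "" <;> simp [midTagS, hk]
  | succ m =>
    have hcons2 : List.replicate (m + 1) k ++ r = k :: (List.replicate m k ++ r) := by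
      simp [List.replicate_succ]
    have hcons : List.replicate (m + 1 + 1) k ++ r = k :: (List.replicate (m + 1) k ++ r) := by
      simp [List.replicate_succ]
    rw [hcons, hcons2, walk_cons_cons, ← hcons2, beq_self_eq_true, walk_inner k m r h]
    by_cases hk : k = "" <;>
      simp [midTagS, hk, List.replicate_succ] <;>
      rw [List.append_cons, ← List.replicate_succ', List.replicate_succ, List.cons_append]

lemma alt_eq_walk (y : List String) : biluo_tag_alt y = walk false y := by
  induction hL : y.length using Nat.strong_induction_on generalizing y with
  | _ n ih =>
  cases y with
  | nil => simp [biluo_tag_alt, walk]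
  | cons key rest =>
    set t := rest.takeWhile (fun s => s == key) with ht
    set r := rest.dropWhile (fun s => s == key) with hr
    have htr : t ++ r = rest := List.takeWhile_append_dropWhile
    have hrep : rest = List.replicate t.length key ++ r := by
      rw [← htr]
      congr 1
      refine List.eq_replicate_of_mem ?_
      intro b hb
      have hb' : b ∈ rest.takeWhile (fun s => s == key) := by rw [← ht]; exact hb
      have hbk := List.mem_takeWhile_imp hb'
      exact eq_of_beq hbk
    have hhead : ∀ b ∈ r.head?, ¬ b = key := by
      intro b hb he
      have h1 := List.head?_dropWhile_not (fun s => s == key) rest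
      rw [← hr] at h1
      rw [Option.mem_def] at hb
      rw [hb] at h1
      simp at h1
      exact h1 he
    have hdecomp : key :: rest = List.replicate (t.length + 1) key ++ r := by
      rw [List.replicate_succ, List.cons_append, ← hrep]
    have hrlen : r.length < n := by
      have : r.length ≤ rest.length := List.length_dropWhile_le _ _
      simp only [List.length_cons] at hL
      omega
    rw [hdecomp, walk_run key t.length r hhead, ← hdecomp]
    simp only [biluo_tag_alt, ← ht, ← hr]
    rw [ih r.length hrlen r rfl]
    congr 1
    by_cases hk : key = ""
    · simp [hk]
    · simp only [hk, if_false]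
      by_cases h0 : t.length = 0
      · simp [h0]
      · have h1 : ¬ (t.length + 1 = 1) := by omega
        have h2 : t.length + 1 - 2 = t.length - 1 := by omega
        simp only [h1, if_false, h0, if_false, h2]

-- ---- A = walk false ----

-- Tag of the middle position j (1 ≤ j ≤ length - 2), Nat-indexed.
def mN (y : List String) (j : Nat) : String :=
  midTagS (y.getD j "" == y.getD (j - 1) "") (y.getD j "" == y.getD (j + 1) "") (y.getD j "")

def lastN (y : List String) : String :=
  endTagS (y.getD (y.length - 1) "" == y.getD (y.length - 2) "") (y.getD (y.length - 1) "")

lemma walk_drop (y : List String) : ∀ (k i : Nat), 1 ≤ i → i + k + 1 = y.length →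
    walk (y.getD i "" == y.getD (i - 1) "") (y.drop i)
      = (List.range k).map (fun j => mN y (i + j)) ++ [lastN y] := by
  intro k
  induction k with
  | zero =>
    intro i h1 h2
    have hi : i < y.length := by omega
    have hd : y.drop i = [y[i]] := by
      rw [List.drop_eq_getElem_cons hi, List.drop_eq_nil_of_le (by omega)]
    rw [hd, walk_single]
    have e3 : y[i] = y.getD i "" := (List.getD_eq_getElem y "" hi).symm
    have e1 : i = y.length - 1 := by omega
    rw [e3, e1]
    have e2 : y.length - 1 - 1 = y.length - 2 := by omega
    rw [e2]
    simp [lastN]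
  | succ k ih =>
    intro i h1 h2
    have hi : i < y.length := by omega
    have hi1 : i + 1 < y.length := by omega
    have g0 : y.getD i "" = y[i] := List.getD_eq_getElem y "" hi
    have g1 : y.getD (i + 1) "" = y[i + 1] := List.getD_eq_getElem y "" hi1
    have hd : y.drop i = y[i] :: y[i + 1] :: y.drop (i + 2) := by
      rw [List.drop_eq_getElem_cons hi, List.drop_eq_getElem_cons hi1]
    have hd1 : y.drop (i + 1) = y[i + 1] :: y.drop (i + 2) := List.drop_eq_getElem_cons hi1
    rw [hd, walk_cons_cons]
    have hb : (y[i] == y[i + 1]) = (y.getD (i + 1) "" == y.getD (i + 1 - 1) "") := by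
      have e : i + 1 - 1 = i := by omega
      rw [e, g0, g1, Bool.beq_comm]
    have ihh := ih (i + 1) (by omega) (by omega)
    rw [hd1] at ihh
    rw [hb, ihh]
    have hhead : midTagS (y.getD i "" == y.getD (i - 1) "") (y.getD (i + 1) "" == y.getD (i + 1 - 1) "") y[i] = mN y i := by
      have e : i + 1 - 1 = i := by omega
      rw [mN, e, g0, Bool.beq_comm (a := y.getD (i + 1) "")]
    rw [hhead, List.range_succ_eq_map, List.map_cons, List.map_map]
    have htail : (List.range k).map ((fun j => mN y (i + j)) ∘ Nat.succ)
        = (List.range k).map (fun j => mN y (i + 1 + j)) := by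
      refine List.map_congr_left ?_
      intro j _
      simp only [Function.comp_apply]
      congr 1
      omega
    rw [htail]
    simp

-- the value appended for middle index i, as the port computes it (Int index)
lemma mid_body_eq (y : List String) (acc : List String) (i : Int) :
    (let prv := PySem.List.pyGetD y i "" == PySem.List.pyGetD y (i - 1) ""
     let nxt := PySem.List.pyGetD y i "" == PySem.List.pyGetD y (i + 1) ""
     if PySem.List.pyGetD y i "" = "" then acc ++ ["O"]
     else if !prv && nxt then acc ++ ["B-" ++ PySem.List.pyGetD y i ""]
     else if prv && nxt then acc ++ ["I-" ++ PySem.List.pyGetD y i ""]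
     else if prv && !nxt then acc ++ ["L-" ++ PySem.List.pyGetD y i ""]
     else acc ++ ["U-" ++ PySem.List.pyGetD y i ""])
    = acc ++ [midTagS (PySem.List.pyGetD y i "" == PySem.List.pyGetD y (i - 1) "")
        (PySem.List.pyGetD y i "" == PySem.List.pyGetD y (i + 1) "") (PySem.List.pyGetD y i "")] := by
  simp only [midTagS]
  split_ifs <;> rfl

lemma mI_eq_mN (y : List String) (m : Nat) (h1 : 1 ≤ m) :
    midTagS (PySem.List.pyGetD y (m : Int) "" == PySem.List.pyGetD y ((m : Int) - 1) "")
        (PySem.List.pyGetD y (m : Int) "" == PySem.List.pyGetD y ((m : Int) + 1) "")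
        (PySem.List.pyGetD y (m : Int) "") = mN y m := by
  have e1 : ((m : Int) - 1) = ((m - 1 : Nat) : Int) := by omega
  have e2 : ((m : Int) + 1) = ((m + 1 : Nat) : Int) := by omega
  rw [e1, e2, PySem.List.pyGetD_natCast, PySem.List.pyGetD_natCast, PySem.List.pyGetD_natCast, mN]

lemma end_body_eq (a b : String) (acc : List String) :
    (if a = "" then acc ++ ["O"]
     else if a = b then acc ++ ["L-" ++ a]
     else acc ++ ["U-" ++ a])
    = acc ++ [endTagS (a == b) a] := by
  simp only [endTagS]
  by_cases h : a = "" <;> by_cases h2 : a = b <;>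
    simp [h, h2] <;> split_ifs <;> simp_all

lemma first_eq (a b : String) :
    (if a = "" then ([] : List String) ++ ["O"]
     else if a = b then ([] : List String) ++ ["B-" ++ a]
     else ([] : List String) ++ ["U-" ++ a])
    = [midTagS false (a == b) a] := by
  simp only [midTagS]
  by_cases h : a = "" <;> by_cases h2 : a = b <;>
    simp [h, h2] <;> split_ifs <;> simp_all

lemma A_eq_walk (y : List String) : biluo_tag y = walk false y := by
  cases y with
  | nil => rfl
  | cons a t =>
    cases t with
    | nil =>
      by_cases ha : a = "" <;>
        simp [biluo_tag, walk, endTagS, ha, PySem.List.pyGetD]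
    | cons b l =>
      have h0 : ¬ (((a :: b :: l).length : Int) = 0) := by
        simp only [List.length_cons]
        omega
      have h1 : ¬ (((a :: b :: l).length : Int) = 1) := by
        simp only [List.length_cons]
        omega
      rw [biluo_tag]
      simp only [if_neg h0, if_neg h1]
      rw [first_eq]
      have hbody : (fun (tagged : List String) (i : Int) =>
          let prv := PySem.List.pyGetD (a :: b :: l) i "" == PySem.List.pyGetD (a :: b :: l) (i - 1) ""
          let nxt := PySem.List.pyGetD (a :: b :: l) i "" == PySem.List.pyGetD (a :: b :: l) (i + 1) ""
          if PySem.List.pyGetD (a :: b :: l) i "" = "" then tagged ++ ["O"]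
          else if !prv && nxt then tagged ++ ["B-" ++ PySem.List.pyGetD (a :: b :: l) i ""]
          else if prv && nxt then tagged ++ ["I-" ++ PySem.List.pyGetD (a :: b :: l) i ""]
          else if prv && !nxt then tagged ++ ["L-" ++ PySem.List.pyGetD (a :: b :: l) i ""]
          else tagged ++ ["U-" ++ PySem.List.pyGetD (a :: b :: l) i ""])
          = (fun (acc : List String) (i : Int) => acc ++
            [midTagS (PySem.List.pyGetD (a :: b :: l) i "" == PySem.List.pyGetD (a :: b :: l) (i - 1) "")
              (PySem.List.pyGetD (a :: b :: l) i "" == PySem.List.pyGetD (a :: b :: l) (i + 1) "")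
              (PySem.List.pyGetD (a :: b :: l) i "")]) := by
        funext acc i
        exact mid_body_eq (a :: b :: l) acc i
      rw [hbody, PySem.List.foldl_append_singleton_eq_map, end_body_eq]
      -- rewrite the range of Int indices as mapped Nat indices
      rw [PySem.List.pyRange_one, List.map_map]
      have hT : ((((a :: b :: l).length : Int) - 1) - 1).toNat = l.length := by
        simp only [List.length_cons]
        omega
      rw [hT]
      have hmap : (List.range l.length).map
            ((fun i => midTagS (PySem.List.pyGetD (a :: b :: l) i "" == PySem.List.pyGetD (a :: b :: l) (i - 1) "")
              (PySem.List.pyGetD (a :: b :: l) i "" == PySem.List.pyGetD (a :: b :: l) (i + 1) "")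
              (PySem.List.pyGetD (a :: b :: l) i "")) ∘ (fun k : Nat => 1 + (k : Int)))
          = (List.range l.length).map (fun j => mN (a :: b :: l) (1 + j)) := by
        refine List.map_congr_left ?_
        intro j _
        simp only [Function.comp_apply]
        have e : (1 + (j : Int)) = (((1 + j : Nat) : Int)) := by push_cast; ring
        rw [e, mI_eq_mN (a :: b :: l) (1 + j) (by omega)]
      rw [hmap]
      -- the first and last tags in Nat form
      have e1 : (((a :: b :: l).length : Int) - 1) = (((l.length + 1 : Nat) : Int)) := by
        simp only [List.length_cons]; push_cast; ring
      have e2 : (((a :: b :: l).length : Int) - 2) = ((l.length : Nat) : Int) := by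
        simp only [List.length_cons]; push_cast; ring
      rw [e1, e2, PySem.List.pyGetD_natCast, PySem.List.pyGetD_natCast]
      have eg0 : PySem.List.pyGetD (a :: b :: l) 0 "" = a := PySem.List.pyGetD_zero_cons a (b :: l) ""
      have eg1 : PySem.List.pyGetD (a :: b :: l) 1 "" = b := by
        have : (1 : Int) = ((1 : Nat) : Int) := rfl
        rw [this, PySem.List.pyGetD_natCast]
        rfl
      rw [eg0, eg1]
      -- right-hand side via walk_drop at i = 1
      have hw := walk_drop (a :: b :: l) l.length 1 (by omega)
        (by simp only [List.length_cons]; omega)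
      have hdrop : (a :: b :: l).drop 1 = b :: l := rfl
      rw [hdrop] at hw
      have hgd0 : (a :: b :: l).getD (1 - 1) "" = a := rfl
      have hgd1 : (a :: b :: l).getD 1 "" = b := rfl
      rw [hgd0, hgd1] at hw
      rw [walk_cons_cons, Bool.beq_comm (a := a) (b := b), hw]
      -- both sides are first :: middle ++ [last]
      have hlast : (a :: b :: l).getD (l.length + 1) "" = (b :: l).getD l.length "" := rfl
      simp only [lastN, List.length_cons]
      have eL1 : l.length + 1 + 1 - 1 = l.length + 1 := by omega
      have eL2 : l.length + 1 + 1 - 2 = l.length := by omega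
      rw [eL1, eL2]
      simp

-- ===== VERDICT (by name: the statement is the Claim_ definition above) =====
theorem biluo_tag_spec : Claim_equal_biluo_tag := by
  intro y _
  unfold Spec_biluo_tag
  rw [A_eq_walk, alt_eq_walk]
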